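-- pv_equiv track=rewrite | github.com/darrenjedwards/spdp-observer-p-vs-np | spdp_exact.py | rank_stream
-- ===== SOURCE A (Python) =====
-- from typing import Dict, Tuple, Iterable, List
--
-- PRIME = 1_000_003
--
-- def mod_inv(a: int, p: int = PRIME) -> int:
--     a %= p
--     if a == 0:
--         raise ZeroDivisionError("inverse of 0")
--     return pow(a, p - 2, p)
--
-- def rank_stream(vectors: Iterable[Dict[int, int]], ncols: int) -> int:
--     basis: Dict[int, Dict[int, int]] = {}
--     rank = 0
--     for vec0 in vectors:
--         v = {j: (val % PRIME) for j, val in vec0.items() if (val % PRIME) != 0}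
--         while v:
--             pivot = max(v.keys())
--             if pivot in basis:
--                 b = basis[pivot]
--                 factor = v[pivot]
--                 for j, bj in b.items():
--                     v[j] = (v.get(j, 0) - factor * bj) % PRIME
--                     if v[j] == 0:
--                         v.pop(j, None)
--             else:
--                 inv = mod_inv(v[pivot])
--                 for j in list(v.keys()):
--                     v[j] = (v[j] * inv) % PRIME
--                 basis[pivot] = v
--                 rank += 1
--                 break
--     return rank
-- ===== SOURCE B (Python) =====
-- PRIME = 1_000_003
--
-- def mod_inv(a: int, p: int = PRIME) -> int:
--     a %= p
--     if a == 0: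
--         raise ZeroDivisionError("inverse of 0")
--     return pow(a, p - 2, p)
--
-- def _sub_scaled(v, row, factor):
--     # v - factor*row over GF(PRIME); v, row are lists of (col, val) sorted by
--     # column descending with distinct columns; zero residuals are dropped.
--     out = []
--     i = k = 0
--     while i < len(v) and k < len(row):
--         (jv, xv), (jr, xr) = v[i], row[k]
--         if jv > jr:
--             out.append((jv, xv))
--             i += 1
--         elif jv < jr:
--             x = (-factor * xr) % PRIME
--             if x != 0:
--                 out.append((jr, x))
--             k += 1
--         else:
--             x = (xv - factor * xr) % PRIME
--             if x != 0:
--                 out.append((jv, x))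
--             i += 1
--             k += 1
--     out.extend(v[i:])
--     while k < len(row):
--         jr, xr = row[k]
--         x = (-factor * xr) % PRIME
--         if x != 0:
--             out.append((jr, x))
--         k += 1
--     return out
--
-- def rank_stream(vectors, ncols):
--     basis = {}  # pivot column -> row as a descending-sorted list of (col, val)
--     rank = 0
--     for vec in vectors:
--         v = sorted(((j, val % PRIME) for j, val in vec.items() if val % PRIME != 0),
--                    key=lambda kv: kv[0], reverse=True)
--         while v:
--             pivot, lead = v[0]
--             row = basis.get(pivot)
--             if row is None:
--                 inv = mod_inv(lead)
--                 v = [(j, (x * inv) % PRIME) for j, x in v]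
--                 basis[pivot] = v
--                 rank += 1
--                 break
--             v = _sub_scaled(v, row, lead)
--     return rank
-- ===== Notes on version B (the rewrite author's own statement) =====
-- stated objective: alternative
-- what changed: Each streamed vector is kept as a descending-sorted sparse list instead of a dict: one sort per vector replaces the per-iteration max(v.keys()) scan, and every elimination step becomes a single linear two-pointer merge of the vector with the stored basis row instead of a keyed dict-update loop with zero-popping.
import Mathlib
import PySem

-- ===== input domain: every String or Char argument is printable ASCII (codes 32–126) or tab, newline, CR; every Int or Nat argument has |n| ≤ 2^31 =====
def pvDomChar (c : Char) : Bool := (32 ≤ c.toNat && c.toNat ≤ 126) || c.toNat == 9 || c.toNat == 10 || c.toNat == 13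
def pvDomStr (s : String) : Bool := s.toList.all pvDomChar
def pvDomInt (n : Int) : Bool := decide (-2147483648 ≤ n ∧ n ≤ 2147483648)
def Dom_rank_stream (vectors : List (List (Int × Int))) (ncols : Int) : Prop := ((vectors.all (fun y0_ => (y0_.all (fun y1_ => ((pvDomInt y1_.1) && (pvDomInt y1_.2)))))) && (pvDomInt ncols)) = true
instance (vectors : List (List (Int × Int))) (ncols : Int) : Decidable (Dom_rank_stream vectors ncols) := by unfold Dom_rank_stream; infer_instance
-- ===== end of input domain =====

-- B replaces A's dict-per-vector elimination (max() scan + keyed updates) by descending-sorted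
-- sparse rows merged linearly; same rank for every input (objective: alternative).

-- ===== PORT A =====
def pvP : Int := 1000003

-- mod_inv(a): a %= p; pow(a, p-2, p).  Both Pythons define this same helper; the a == 0
-- ZeroDivisionError branch is unreachable in both programs (every argument passed is a stored
-- value in [1, p)), so the port is total.
def pvModInv (a : Int) : Int := PySem.Int.powMod (PySem.Int.mod a pvP) 1000001 pvP

-- body of 'for j, bj in b.items(): v[j] = (v.get(j,0) - factor*bj) % PRIME; if v[j]==0: v.pop(j, None)'
-- (v[j] is always present right before the pop, so pop = erase)
def pvStepA (factor : Int) (v : PySem.Dict Int Int) (p : Int × Int) : PySem.Dict Int Int :=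
  let x := PySem.Int.mod (v.getD p.1 0 - factor * p.2) pvP
  let v1 := v.insert p.1 x
  if x = 0 then v1.erase p.1 else v1

-- body of 'for j in list(v.keys()): v[j] = (v[j] * inv) % PRIME'  (v[j] is present: j ∈ v.keys)
def pvNormA (inv : Int) (w : PySem.Dict Int Int) (j : Int) : PySem.Dict Int Int :=
  w.insert j (PySem.Int.mod (w.getD j 0 * inv) pvP)

-- the 'while v:' loop; fuel is a termination guard only (the pivot strictly decreases inside the
-- key universe of v and basis, so 'v.size + total basis entries + 1' steps always suffice)
def pvLoopA (fuel : Nat) (basis : PySem.Dict Int (PySem.Dict Int Int)) (rank : Int)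
    (v : PySem.Dict Int Int) : PySem.Dict Int (PySem.Dict Int Int) × Int :=
  match fuel with
  | 0 => (basis, rank)
  | fuel + 1 =>
    match PySem.List.max? v.keys (fun j => j) with    -- none ↔ v empty ('while v'); some = max(v.keys())
    | none => (basis, rank)
    | some pivot =>
      match basis.get? pivot with
      | some b =>
        let factor := v.getD pivot 0                  -- v[pivot], present since pivot = max(v.keys())
        pvLoopA fuel basis rank (b.items.foldl (pvStepA factor) v)
      | none =>
        let inv := pvModInv (v.getD pivot 0)
        let v' := v.keys.foldl (pvNormA inv) v
        (basis.insert pivot v', rank + 1)             -- 'break'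

-- v = {j: (val % PRIME) for j, val in vec0.items() if (val % PRIME) != 0}
def pvBuildStepA (acc : PySem.Dict Int Int) (jv : Int × Int) : PySem.Dict Int Int :=
  if PySem.Int.mod jv.2 pvP ≠ 0 then acc.insert jv.1 (PySem.Int.mod jv.2 pvP) else acc

def pvBuildA (vec0 : List (Int × Int)) : PySem.Dict Int Int :=
  (PySem.Dict.ofList vec0).items.foldl pvBuildStepA PySem.Dict.empty

def pvTotA (basis : PySem.Dict Int (PySem.Dict Int Int)) : Nat :=
  basis.items.foldl (fun a p => a + p.2.items.length) 0

def pvFeedA (st : PySem.Dict Int (PySem.Dict Int Int) × Int) (vec0 : List (Int × Int)) :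
    PySem.Dict Int (PySem.Dict Int Int) × Int :=
  let v := pvBuildA vec0
  pvLoopA (v.items.length + pvTotA st.1 + 1) st.1 st.2 v

def rank_stream (vectors : List (List (Int × Int))) (ncols : Int) : Int :=
  (vectors.foldl pvFeedA (PySem.Dict.empty, 0)).2

-- ===== PORT B =====
-- _sub_scaled(v, row, factor): linear merge of two descending-sorted sparse rows
def pvSubScaled (factor : Int) : List (Int × Int) → List (Int × Int) → List (Int × Int)
  | v, [] => v
  | [], (jr, xr) :: row =>
      let x := PySem.Int.mod (-factor * xr) pvP
      let rest := pvSubScaled factor [] row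
      if x ≠ 0 then (jr, x) :: rest else rest
  | (jv, xv) :: v, (jr, xr) :: row =>
      if jv > jr then (jv, xv) :: pvSubScaled factor v ((jr, xr) :: row)
      else if jv < jr then
        let x := PySem.Int.mod (-factor * xr) pvP
        let rest := pvSubScaled factor ((jv, xv) :: v) row
        if x ≠ 0 then (jr, x) :: rest else rest
      else
        let x := PySem.Int.mod (xv - factor * xr) pvP
        let rest := pvSubScaled factor v row
        if x ≠ 0 then (jv, x) :: rest else rest
  termination_by v row => v.length + row.length

-- the 'while v:' loop of B (same fuel guard as A's port)
def pvLoopB (fuel : Nat) (basis : PySem.Dict Int (List (Int × Int))) (rank : Int)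
    (v : List (Int × Int)) : PySem.Dict Int (List (Int × Int)) × Int :=
  match fuel with
  | 0 => (basis, rank)
  | fuel + 1 =>
    match v with
    | [] => (basis, rank)
    | (pivot, lead) :: _ =>
      match basis.get? pivot with
      | none =>
        let inv := pvModInv lead
        let v' := v.map (fun jx => (jx.1, PySem.Int.mod (jx.2 * inv) pvP))
        (basis.insert pivot v', rank + 1)
      | some row => pvLoopB fuel basis rank (pvSubScaled lead v row)

-- v = sorted(((j, val % PRIME) ... if val % PRIME != 0), key=lambda kv: kv[0], reverse=True)
def pvBuildB (vec : List (Int × Int)) : List (Int × Int) :=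
  PySem.List.sorted
    (((PySem.Dict.ofList vec).items.filter (fun jv => PySem.Int.mod jv.2 pvP != 0)).map
      (fun jv => (jv.1, PySem.Int.mod jv.2 pvP)))
    (fun kv => kv.1) true

def pvTotB (basis : PySem.Dict Int (List (Int × Int))) : Nat :=
  basis.items.foldl (fun a p => a + p.2.length) 0

def pvFeedB (st : PySem.Dict Int (List (Int × Int)) × Int) (vec : List (Int × Int)) :
    PySem.Dict Int (List (Int × Int)) × Int :=
  let v := pvBuildB vec
  pvLoopB (v.length + pvTotB st.1 + 1) st.1 st.2 v

def rank_stream_alt (vectors : List (List (Int × Int))) (ncols : Int) : Int :=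
  (vectors.foldl pvFeedB (PySem.Dict.empty, 0)).2

-- ===== PRECONDITION & SPEC =====
def Spec_rank_stream (vectors : List (List (Int × Int))) (ncols : Int) (out : Int) : Prop := out = rank_stream_alt vectors ncols
instance (vectors : List (List (Int × Int))) (ncols : Int) (out : Int) : Decidable (Spec_rank_stream vectors ncols out) := by unfold Spec_rank_stream; infer_instance

-- ===== CLAIM (what is proved, stated in full; the proofs are below) =====
def Claim_equal_rank_stream : Prop := ∀ (vectors : List (List (Int × Int))) (ncols : Int), Dom_rank_stream vectors ncols → Spec_rank_stream vectors ncols (rank_stream vectors ncols)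

-- ===== LEMMAS AND PROOFS =====

-- a vector as A keeps it (a dict) vs as B keeps it (a descending-sorted assoc list):
def pvSortedD (l : List (Int × Int)) : Prop := l.Pairwise (fun a b => b.1 < a.1)

def pvVRel (d : PySem.Dict Int Int) (l : List (Int × Int)) : Prop :=
  d.keys.Nodup ∧ pvSortedD l ∧ ∀ j : Int, d.get? j = List.lookup j l

def pvRowRel : Option (PySem.Dict Int Int) → Option (List (Int × Int)) → Prop
  | none, none => True
  | some d, some l => pvVRel d l
  | _, _ => False

def pvBRel (bA : PySem.Dict Int (PySem.Dict Int Int)) (bB : PySem.Dict Int (List (Int × Int))) : Prop :=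
  bA.keys.Nodup ∧ bB.keys.Nodup ∧ pvTotA bA = pvTotB bB ∧ ∀ k : Int, pvRowRel (bA.get? k) (bB.get? k)

-- the common residual formula of one elimination step at one column
def pvResid (v? : Option Int) (f bj : Int) : Option Int :=
  let x := PySem.Int.mod (v?.getD 0 - f * bj) pvP
  if x = 0 then none else some x

lemma pv_lookup_eq_none_iff (l : List (Int × Int)) (j : Int) :
    List.lookup j l = none ↔ j ∉ l.map Prod.fst := by
  induction l with
  | nil => simp
  | cons p t ih => obtain ⟨k, x⟩ := p; simp [List.lookup]; split <;> simp_all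

lemma pv_lookup_eq_some_iff (l : List (Int × Int)) (hl : (l.map Prod.fst).Nodup) (j x : Int) :
    List.lookup j l = some x ↔ (j, x) ∈ l := by
  induction l with
  | nil => simp
  | cons p t ih =>
    obtain ⟨k, y⟩ := p
    simp only [List.map_cons, List.nodup_cons] at hl
    by_cases h : j = k
    · subst h
      have hb : (j == j) = true := by simp
      simp only [List.lookup, hb, List.mem_cons]
      constructor
      · rintro h'; left
        cases h'; rfl
      · rintro (h' | hm)
        · cases h'; rfl
        · exact absurd (List.mem_map_of_mem (f := Prod.fst) hm) (by simpa using hl.1)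
    · have hb : (j == k) = false := by simp [h]
      simp only [List.lookup, hb, List.mem_cons]
      rw [ih hl.2]
      constructor
      · exact .inr
      · rintro (h' | hm)
        · cases h'; exact absurd rfl h
        · exact hm

lemma pv_sortedD_nodup_fst (l : List (Int × Int)) (h : pvSortedD l) : (l.map Prod.fst).Nodup := by
  exact List.pairwise_map.mpr (h.imp fun hlt => ne_of_gt hlt)

lemma pv_find?_filter_ne (items : List (Int × Int)) (k j : Int) :
    Option.map (fun p : Int × Int => p.2)
        (List.find? (fun p => p.1 == j) (items.filter (fun p => !(p.1 == k)))) =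
      if j = k then none
      else Option.map (fun p : Int × Int => p.2) (List.find? (fun p => p.1 == j) items) := by
  induction items with
  | nil => simp
  | cons p t ih =>
    obtain ⟨a, x⟩ := p
    by_cases hak : a = k
    · subst hak
      rw [List.filter_cons_of_neg (by simp)]
      rw [ih]
      by_cases hj : j = a
      · simp [hj]
      · rw [List.find?_cons_of_neg (by simp [Ne.symm hj])]
    · rw [List.filter_cons_of_pos (by simp [hak])]
      by_cases hj : j = a
      · subst hj
        rw [List.find?_cons_of_pos (by simp), List.find?_cons_of_pos (by simp)]
        rw [if_neg hak]
      · rw [List.find?_cons_of_neg (by simp [Ne.symm hj]),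
            List.find?_cons_of_neg (by simp [Ne.symm hj]), ih]

lemma pv_get?_eq_lookup_items (d : PySem.Dict Int Int) (j : Int) :
    d.get? j = List.lookup j d.items := by
  obtain ⟨items⟩ := d
  induction items with
  | nil => simp [PySem.Dict.get?]
  | cons p t ih =>
    obtain ⟨k, x⟩ := p
    by_cases h : j = k
    · subst h
      simp only [PySem.Dict.get?] at *
      rw [List.find?_cons_of_pos (by simp)]
      simp [List.lookup]
    · simp only [PySem.Dict.get?] at *
      rw [List.find?_cons_of_neg (by simp [Ne.symm h])]
      simp only [List.lookup, show (j == k) = false by simp [h]]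
      exact ih

lemma pv_get?_erase (d : PySem.Dict Int Int) (k j : Int) :
    (d.erase k).get? j = if j = k then none else d.get? j := by
  obtain ⟨items⟩ := d
  simpa only [PySem.Dict.erase, PySem.Dict.get?] using pv_find?_filter_ne items k j

lemma pv_nodup_keys_erase (d : PySem.Dict Int Int) (k : Int) (h : d.keys.Nodup) :
    (d.erase k).keys.Nodup := by
  apply List.Nodup.sublist _ h
  simp only [PySem.Dict.keys, PySem.Dict.erase]
  exact List.Sublist.map _ List.filter_sublist

lemma pv_vrel_length (d : PySem.Dict Int Int) (l : List (Int × Int)) (h : pvVRel d l) :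
    d.items.length = l.length := by
  obtain ⟨hnd, hs, hlk⟩ := h
  have hfst := pv_sortedD_nodup_fst l hs
  have hperm : d.keys.Perm (l.map Prod.fst) := by
    rw [List.perm_ext_iff_of_nodup hnd hfst]
    intro a
    rw [← not_iff_not]
    rw [← PySem.Dict.get?_eq_none_iff_not_mem_keys, hlk a, pv_lookup_eq_none_iff]
  have h1 : d.items.length = d.keys.length := by
    simp [PySem.Dict.keys]
  rw [h1, hperm.length_eq, List.length_map]

lemma pv_foldA_get? (f : Int) (l : List (Int × Int)) (hl : (l.map Prod.fst).Nodup) :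
    ∀ (v : PySem.Dict Int Int) (j : Int),
      (l.foldl (pvStepA f) v).get? j =
        match List.lookup j l with
        | some bj => pvResid (v.get? j) f bj
        | none => v.get? j := by
  induction l with
  | nil => intro v j; simp
  | cons p t ih =>
    obtain ⟨k, bk⟩ := p
    intro v j
    simp only [List.map_cons, List.nodup_cons] at hl
    simp only [List.foldl_cons]
    rw [ih hl.2]
    by_cases h : j = k
    · subst h
      have ht : List.lookup j t = none := (pv_lookup_eq_none_iff t j).mpr (by simpa using hl.1)
      rw [ht]
      simp only [List.lookup, show (j == j) = true by simp]
      show (pvStepA f v (j, bk)).get? j = pvResid (v.get? j) f bk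
      simp only [pvStepA, pvResid, PySem.Dict.getD_eq_get?_getD]
      split
      · rename_i hx
        rw [pv_get?_erase, if_pos rfl]
      · rename_i hx
        rw [PySem.Dict.get?_insert_self]
    · have hv : (pvStepA f v (k, bk)).get? j = v.get? j := by
        simp only [pvStepA]
        split
        · rw [pv_get?_erase, if_neg h, PySem.Dict.get?_insert_of_ne _ _ h]
        · rw [PySem.Dict.get?_insert_of_ne _ _ h]
      simp only [List.lookup, show (j == k) = false by simp [h]]
      cases hlt : List.lookup j t with
      | none => simp [hv]
      | some bj => simp [pvResid, hv]

lemma pv_foldA_nodup (f : Int) (l : List (Int × Int)) :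
    ∀ v : PySem.Dict Int Int, v.keys.Nodup → (l.foldl (pvStepA f) v).keys.Nodup := by
  induction l with
  | nil => intro v h; simpa using h
  | cons p t ih =>
    intro v h
    simp only [List.foldl_cons]
    apply ih
    simp only [pvStepA]
    split
    · exact pv_nodup_keys_erase _ _ (PySem.Dict.nodup_keys_insert _ _ _ h)
    · exact PySem.Dict.nodup_keys_insert _ _ _ h

lemma pv_subScaled_keys (f : Int) : ∀ (v row : List (Int × Int)) (p : Int × Int),
    p ∈ pvSubScaled f v row → p.1 ∈ v.map Prod.fst ∨ p.1 ∈ row.map Prod.fst := by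
  intro v row
  induction v, row using pvSubScaled.induct (factor := f) with
  | case1 v =>
    intro p hp
    rw [pvSubScaled] at hp
    exact .inl (List.mem_map_of_mem hp)
  | case2 jr xr row x hx ih =>
    intro p hp
    rw [pvSubScaled, if_pos hx] at hp
    rcases List.mem_cons.mp hp with h | h
    · subst h; simp
    · rcases ih p h with h' | h'
      · simp at h'
      · simp only [List.map_cons, List.mem_cons]; exact .inr (.inr h')
  | case3 jr xr row x hx ih =>
    intro p hp
    rw [pvSubScaled, if_neg hx] at hp
    rcases ih p hp with h' | h'
    · simp at h'
    · simp only [List.map_cons, List.mem_cons]; exact .inr (.inr h')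
  | case4 jv xv v jr xr row hgt ih =>
    intro p hp
    rw [pvSubScaled, if_pos hgt] at hp
    rcases List.mem_cons.mp hp with h | h
    · subst h; simp
    · rcases ih p h with h' | h'
      · exact .inl (by simp only [List.map_cons, List.mem_cons]; exact .inr h')
      · exact .inr h'
  | case5 jv xv v jr xr row hgt hlt x hx ih =>
    intro p hp
    rw [pvSubScaled, if_neg hgt, if_pos hlt, if_pos hx] at hp
    rcases List.mem_cons.mp hp with h | h
    · subst h; simp
    · rcases ih p h with h' | h'
      · exact .inl h'
      · exact .inr (by simp only [List.map_cons, List.mem_cons]; exact .inr h')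
  | case6 jv xv v jr xr row hgt hlt x hx ih =>
    intro p hp
    rw [pvSubScaled, if_neg hgt, if_pos hlt, if_neg hx] at hp
    rcases ih p hp with h' | h'
    · exact .inl h'
    · exact .inr (by simp only [List.map_cons, List.mem_cons]; exact .inr h')
  | case7 jv xv v jr xr row hgt hlt x hx ih =>
    intro p hp
    rw [pvSubScaled, if_neg hgt, if_neg hlt, if_pos hx] at hp
    rcases List.mem_cons.mp hp with h | h
    · subst h; simp
    · rcases ih p h with h' | h'
      · exact .inl (by simp only [List.map_cons, List.mem_cons]; exact .inr h')
      · exact .inr (by simp only [List.map_cons, List.mem_cons]; exact .inr h')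
  | case8 jv xv v jr xr row hgt hlt x hx ih =>
    intro p hp
    rw [pvSubScaled, if_neg hgt, if_neg hlt, if_neg hx] at hp
    rcases ih p hp with h' | h'
    · exact .inl (by simp only [List.map_cons, List.mem_cons]; exact .inr h')
    · exact .inr (by simp only [List.map_cons, List.mem_cons]; exact .inr h')

lemma pv_lookup_cons_self (k x : Int) (t : List (Int × Int)) :
    List.lookup k ((k, x) :: t) = some x := by
  simp [List.lookup]

lemma pv_lookup_cons_ne {j k : Int} (x : Int) (t : List (Int × Int)) (h : j ≠ k) :
    List.lookup j ((k, x) :: t) = List.lookup j t := by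
  simp [List.lookup, show (j == k) = false by simp [h]]

lemma pv_lookup_eq_none_of_gt (l : List (Int × Int)) (j : Int) (h : ∀ q ∈ l, q.1 < j) :
    List.lookup j l = none := by
  rw [pv_lookup_eq_none_iff]
  intro hm
  rcases List.mem_map.mp hm with ⟨b, hb, hq⟩
  have := h b hb
  omega

lemma pv_subScaled_sorted (f : Int) : ∀ (v row : List (Int × Int)),
    pvSortedD v → pvSortedD row → pvSortedD (pvSubScaled f v row) := by
  intro v row
  induction v, row using pvSubScaled.induct (factor := f) with
  | case1 v => intro hv _; rw [pvSubScaled]; exact hv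
  | case2 jr xr row x hx ih =>
    intro hv hr
    rcases hr with - | ⟨hrh, hrt⟩
    rw [pvSubScaled, if_pos hx]
    refine List.Pairwise.cons ?_ (ih hv hrt)
    intro q hq
    rcases pv_subScaled_keys f [] row q hq with h | h
    · simp at h
    · rcases List.mem_map.mp h with ⟨b, hb, hq1⟩
      have := hrh b hb
      simp only at *; omega
  | case3 jr xr row x hx ih =>
    intro hv hr
    rcases hr with - | ⟨hrh, hrt⟩
    rw [pvSubScaled, if_neg hx]
    exact ih hv hrt
  | case4 jv xv v jr xr row hgt ih =>
    intro hv hr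
    rcases hv with - | ⟨hvh, hvt⟩
    rw [pvSubScaled, if_pos hgt]
    refine List.Pairwise.cons ?_ (ih hvt hr)
    intro q hq
    rcases hr with - | ⟨hrh, hrt⟩
    rcases pv_subScaled_keys f v ((jr, xr) :: row) q hq with h | h
    · rcases List.mem_map.mp h with ⟨b, hb, hq1⟩
      have := hvh b hb
      simp only at *; omega
    · rcases List.mem_map.mp h with ⟨b, hb, hq1⟩
      rcases List.mem_cons.mp hb with hb' | hb'
      · subst hb'; simp only at *; omega
      · have := hrh b hb'
        simp only at *; omega
  | case5 jv xv v jr xr row hgt hlt x hx ih =>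
    intro hv hr
    rcases hr with - | ⟨hrh, hrt⟩
    rw [pvSubScaled, if_neg hgt, if_pos hlt, if_pos hx]
    refine List.Pairwise.cons ?_ (ih hv hrt)
    intro q hq
    rcases pv_subScaled_keys f ((jv, xv) :: v) row q hq with h | h
    · rcases List.mem_map.mp h with ⟨b, hb, hq1⟩
      rcases List.mem_cons.mp hb with hb' | hb'
      · subst hb'; simp only at *; omega
      · rcases hv with - | ⟨hvh, hvt⟩
        have := hvh b hb'
        simp only at *; omega
    · rcases List.mem_map.mp h with ⟨b, hb, hq1⟩
      have := hrh b hb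
      simp only at *; omega
  | case6 jv xv v jr xr row hgt hlt x hx ih =>
    intro hv hr
    rcases hr with - | ⟨hrh, hrt⟩
    rw [pvSubScaled, if_neg hgt, if_pos hlt, if_neg hx]
    exact ih hv hrt
  | case7 jv xv v jr xr row hgt hlt x hx ih =>
    intro hv hr
    rcases hv with - | ⟨hvh, hvt⟩
    rcases hr with - | ⟨hrh, hrt⟩
    rw [pvSubScaled, if_neg hgt, if_neg hlt, if_pos hx]
    refine List.Pairwise.cons ?_ (ih hvt hrt)
    intro q hq
    rcases pv_subScaled_keys f v row q hq with h | h
    · rcases List.mem_map.mp h with ⟨b, hb, hq1⟩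
      have := hvh b hb
      simp only at *; omega
    · rcases List.mem_map.mp h with ⟨b, hb, hq1⟩
      have := hrh b hb
      simp only at *; omega
  | case8 jv xv v jr xr row hgt hlt x hx ih =>
    intro hv hr
    rcases hv with - | ⟨hvh, hvt⟩
    rcases hr with - | ⟨hrh, hrt⟩
    rw [pvSubScaled, if_neg hgt, if_neg hlt, if_neg hx]
    exact ih hvt hrt

lemma pv_resid_none_eq (f b : Int) :
    pvResid none f b =
      if PySem.Int.mod (-f * b) pvP = 0 then none
      else some (PySem.Int.mod (-f * b) pvP) := by
  simp only [pvResid, Option.getD_none]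
  rw [show (0 : Int) - f * b = -f * b by ring]

lemma pv_subScaled_lookup (f : Int) : ∀ (v row : List (Int × Int)),
    pvSortedD v → pvSortedD row → ∀ j : Int,
      List.lookup j (pvSubScaled f v row) =
        match List.lookup j row with
        | some bj => pvResid (List.lookup j v) f bj
        | none => List.lookup j v := by
  intro v row
  induction v, row using pvSubScaled.induct (factor := f) with
  | case1 v => intro _ _ j; rw [pvSubScaled]; rfl
  | case2 jr xr row x hx ih =>
    intro hv hr j
    have hx' : PySem.Int.mod (-f * xr) pvP ≠ 0 := hx
    rcases hr with - | ⟨hrh, hrt⟩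
    rw [pvSubScaled, if_pos hx]
    by_cases hj : j = jr
    · subst hj
      rw [pv_lookup_cons_self, pv_lookup_cons_self]
      show some x = pvResid none f xr
      rw [pv_resid_none_eq, if_neg hx']
    · rw [pv_lookup_cons_ne _ _ hj, pv_lookup_cons_ne _ _ hj, ih hv hrt j]
  | case3 jr xr row x hx ih =>
    intro hv hr j
    have hx' : PySem.Int.mod (-f * xr) pvP = 0 := not_not.mp hx
    rcases hr with - | ⟨hrh, hrt⟩
    rw [pvSubScaled, if_neg hx]
    by_cases hj : j = jr
    · subst hj
      rw [ih hv hrt j, pv_lookup_cons_self]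
      rw [pv_lookup_eq_none_of_gt row j hrh]
      show (none : Option Int) = pvResid none f xr
      rw [pv_resid_none_eq, if_pos hx']
    · rw [ih hv hrt j, pv_lookup_cons_ne _ _ hj]
  | case4 jv xv v jr xr row hgt ih =>
    intro hv hr j
    rcases hr with - | ⟨hrh, hrt⟩
    rw [pvSubScaled, if_pos hgt]
    by_cases hj : j = jv
    · subst hj
      rw [pv_lookup_cons_self]
      have h1 : List.lookup j ((jr, xr) :: row) = none := by
        rw [pv_lookup_cons_ne _ _ (by omega)]
        exact pv_lookup_eq_none_of_gt row j (fun q hq => by have := hrh q hq; simp only at *; omega)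
      rw [h1, pv_lookup_cons_self]
    · rw [pv_lookup_cons_ne _ _ hj, ih (by rcases hv with - | ⟨_, hvt⟩; exact hvt) (List.Pairwise.cons hrh hrt) j,
          pv_lookup_cons_ne _ _ hj]
  | case5 jv xv v jr xr row hgt hlt x hx ih =>
    intro hv hr j
    have hx' : PySem.Int.mod (-f * xr) pvP ≠ 0 := hx
    rcases hr with - | ⟨hrh, hrt⟩
    rw [pvSubScaled, if_neg hgt, if_pos hlt, if_pos hx]
    by_cases hj : j = jr
    · subst hj
      rw [pv_lookup_cons_self, pv_lookup_cons_self]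
      have h1 : List.lookup j ((jv, xv) :: v) = none := by
        apply pv_lookup_eq_none_of_gt
        intro q hq
        rcases List.mem_cons.mp hq with h | h
        · subst h; simpa using hlt
        · rcases hv with - | ⟨hvh, hvt⟩
          have := hvh q h
          simp only at *; omega
      rw [h1]
      show some x = pvResid none f xr
      rw [pv_resid_none_eq, if_neg hx']
    · rw [pv_lookup_cons_ne _ _ hj, pv_lookup_cons_ne _ _ hj, ih hv hrt j]
  | case6 jv xv v jr xr row hgt hlt x hx ih =>
    intro hv hr j
    have hx' : PySem.Int.mod (-f * xr) pvP = 0 := not_not.mp hx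
    rcases hr with - | ⟨hrh, hrt⟩
    rw [pvSubScaled, if_neg hgt, if_pos hlt, if_neg hx]
    by_cases hj : j = jr
    · subst hj
      rw [ih hv hrt j, pv_lookup_cons_self]
      rw [pv_lookup_eq_none_of_gt row j hrh]
      have h1 : List.lookup j ((jv, xv) :: v) = none := by
        apply pv_lookup_eq_none_of_gt
        intro q hq
        rcases List.mem_cons.mp hq with h | h
        · subst h; simpa using hlt
        · rcases hv with - | ⟨hvh, hvt⟩
          have := hvh q h
          simp only at *; omega
      rw [h1]
      show (none : Option Int) = pvResid none f xr
      rw [pv_resid_none_eq, if_pos hx']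
    · rw [ih hv hrt j, pv_lookup_cons_ne _ _ hj]
  | case7 jv xv v jr xr row hgt hlt x hx ih =>
    intro hv hr j
    have hx' : PySem.Int.mod (xv - f * xr) pvP ≠ 0 := hx
    have hjj : jv = jr := by omega
    subst hjj
    rcases hv with - | ⟨hvh, hvt⟩
    rcases hr with - | ⟨hrh, hrt⟩
    rw [pvSubScaled, if_neg hgt, if_neg hlt, if_pos hx]
    by_cases hj : j = jv
    · subst hj
      rw [pv_lookup_cons_self, pv_lookup_cons_self, pv_lookup_cons_self]
      show some x = pvResid (some xv) f xr
      simp only [pvResid, Option.getD_some]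
      rw [if_neg hx']
    · rw [pv_lookup_cons_ne _ _ hj, pv_lookup_cons_ne _ _ hj, pv_lookup_cons_ne _ _ hj,
          ih hvt hrt j]
  | case8 jv xv v jr xr row hgt hlt x hx ih =>
    intro hv hr j
    have hx' : PySem.Int.mod (xv - f * xr) pvP = 0 := not_not.mp hx
    have hjj : jv = jr := by omega
    subst hjj
    rcases hv with - | ⟨hvh, hvt⟩
    rcases hr with - | ⟨hrh, hrt⟩
    rw [pvSubScaled, if_neg hgt, if_neg hlt, if_neg hx]
    by_cases hj : j = jv
    · subst hj
      rw [ih hvt hrt j, pv_lookup_cons_self, pv_lookup_cons_self]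
      rw [pv_lookup_eq_none_of_gt row j hrh, pv_lookup_eq_none_of_gt v j hvh]
      show (none : Option Int) = pvResid (some xv) f xr
      simp only [pvResid, Option.getD_some]
      rw [if_pos hx']
    · rw [ih hvt hrt j, pv_lookup_cons_ne _ _ hj, pv_lookup_cons_ne _ _ hj]

lemma pv_sub_rel (f : Int) (dv : PySem.Dict Int Int) (lv : List (Int × Int))
    (drow : PySem.Dict Int Int) (lrow : List (Int × Int))
    (h1 : pvVRel dv lv) (h2 : pvVRel drow lrow) :
    pvVRel (drow.items.foldl (pvStepA f) dv) (pvSubScaled f lv lrow) := by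
  obtain ⟨hndv, hsv, hlv⟩ := h1
  obtain ⟨hndr, hsr, hlr⟩ := h2
  have hfst : (drow.items.map Prod.fst).Nodup := by
    simpa [PySem.Dict.keys] using hndr
  refine ⟨pv_foldA_nodup f drow.items dv hndv, pv_subScaled_sorted f lv lrow hsv hsr, ?_⟩
  intro j
  rw [pv_foldA_get? f drow.items hfst dv j, pv_subScaled_lookup f lv lrow hsv hsr j]
  rw [← pv_get?_eq_lookup_items drow j, hlr j, ← hlv j]

lemma pv_foldNorm_get? (inv : Int) (l : List Int) (hl : l.Nodup) :
    ∀ (w : PySem.Dict Int Int) (j : Int),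
      (l.foldl (pvNormA inv) w).get? j =
        if j ∈ l then some (PySem.Int.mod (w.getD j 0 * inv) pvP) else w.get? j := by
  induction l with
  | nil => intro w j; simp
  | cons k t ih =>
    intro w j
    simp only [List.nodup_cons] at hl
    simp only [List.foldl_cons]
    rw [ih hl.2]
    by_cases h : j = k
    · subst h
      rw [if_neg hl.1, if_pos (List.mem_cons_self)]
      simp only [pvNormA, PySem.Dict.get?_insert_self]
    · have hg : (pvNormA inv w k).get? j = w.get? j := by
        simp only [pvNormA]
        exact PySem.Dict.get?_insert_of_ne _ _ h
      by_cases hm : j ∈ t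
      · rw [if_pos hm, if_pos (List.mem_cons_of_mem _ hm)]
        simp only [pvNormA, PySem.Dict.getD_insert_of_ne _ _ _ h]
      · rw [if_neg hm, if_neg (by simp [h, hm])]
        simp only [pvNormA]
        exact PySem.Dict.get?_insert_of_ne _ _ h

lemma pv_lookup_map_snd (g : Int → Int) (l : List (Int × Int)) (j : Int) :
    List.lookup j (l.map (fun jx => (jx.1, g jx.2))) = (List.lookup j l).map g := by
  induction l with
  | nil => simp
  | cons p t ih =>
    obtain ⟨k, x⟩ := p
    simp only [List.map_cons, List.lookup]
    split <;> simp_all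

lemma pv_norm_rel (inv : Int) (dv : PySem.Dict Int Int) (lv : List (Int × Int)) (h : pvVRel dv lv) :
    pvVRel (dv.keys.foldl (pvNormA inv) dv)
      (lv.map (fun jx => (jx.1, PySem.Int.mod (jx.2 * inv) pvP))) := by
  obtain ⟨hnd, hs, hlk⟩ := h
  refine ⟨?_, ?_, ?_⟩
  · have e : pvNormA inv =
        fun (w : PySem.Dict Int Int) (j : Int) => w.insert j (PySem.Int.mod (w.getD j 0 * inv) pvP) := rfl
    rw [e]
    exact PySem.Dict.nodup_keys_foldl_insert _ _ _ hnd
  · exact List.pairwise_map.mpr (hs.imp fun hlt => hlt)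
  · intro j
    rw [pv_foldNorm_get? inv dv.keys hnd dv j,
        pv_lookup_map_snd (fun x => PySem.Int.mod (x * inv) pvP) lv j, ← hlk j]
    by_cases hm : j ∈ dv.keys
    · rw [if_pos hm]
      cases hg : dv.get? j with
      | none => exact absurd ((PySem.Dict.get?_eq_none_iff_not_mem_keys dv j).mp hg) (by simpa using hm)
      | some val =>
        rw [PySem.Dict.getD_eq_get?_getD, hg]
        simp
    · rw [if_neg hm, (PySem.Dict.get?_eq_none_iff_not_mem_keys dv j).mpr hm]
      simp

lemma pv_lookup_eq_of_perm (l1 l2 : List (Int × Int)) (hp : l1.Perm l2)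
    (hnd : (l1.map Prod.fst).Nodup) (j : Int) : List.lookup j l1 = List.lookup j l2 := by
  have hnd2 : (l2.map Prod.fst).Nodup := ((hp.map Prod.fst).nodup_iff).mp hnd
  cases h : List.lookup j l2 with
  | none =>
    rw [pv_lookup_eq_none_iff] at h ⊢
    intro hm
    exact h ((((hp.map Prod.fst)).mem_iff).mp hm)
  | some x =>
    rw [pv_lookup_eq_some_iff l2 hnd2] at h
    rw [pv_lookup_eq_some_iff l1 hnd]
    exact hp.mem_iff.mpr h

lemma pv_buildA_get? (l : List (Int × Int)) (hl : (l.map Prod.fst).Nodup) :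
    ∀ (acc : PySem.Dict Int Int) (j : Int),
      (l.foldl pvBuildStepA acc).get? j =
        match List.lookup j l with
        | some val => if PySem.Int.mod val pvP ≠ 0 then some (PySem.Int.mod val pvP) else acc.get? j
        | none => acc.get? j := by
  induction l with
  | nil => intro acc j; simp
  | cons p t ih =>
    obtain ⟨k, val⟩ := p
    intro acc j
    simp only [List.map_cons, List.nodup_cons] at hl
    simp only [List.foldl_cons]
    rw [ih hl.2]
    by_cases h : j = k
    · subst h
      have ht : List.lookup j t = none := (pv_lookup_eq_none_iff t j).mpr (by simpa using hl.1)
      rw [ht, pv_lookup_cons_self]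
      show (pvBuildStepA acc (j, val)).get? j =
        (if PySem.Int.mod val pvP ≠ 0 then some (PySem.Int.mod val pvP) else acc.get? j)
      simp only [pvBuildStepA]
      split
      · rw [PySem.Dict.get?_insert_self]
      · rfl
    · have hg : (pvBuildStepA acc (k, val)).get? j = acc.get? j := by
        simp only [pvBuildStepA]
        split
        · exact PySem.Dict.get?_insert_of_ne _ _ h
        · rfl
      rw [pv_lookup_cons_ne _ _ h]
      cases hlt : List.lookup j t with
      | none => simp [hg]
      | some bj => simp [hg]

lemma pv_buildA_nodup (l : List (Int × Int)) :
    ∀ acc : PySem.Dict Int Int, acc.keys.Nodup → (l.foldl pvBuildStepA acc).keys.Nodup := by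
  induction l with
  | nil => intro acc h; simpa using h
  | cons p t ih =>
    intro acc h
    simp only [List.foldl_cons]
    apply ih
    simp only [pvBuildStepA]
    split
    · exact PySem.Dict.nodup_keys_insert _ _ _ h
    · exact h

lemma pv_buildB_lookup (l : List (Int × Int)) (hl : (l.map Prod.fst).Nodup) (j : Int) :
    List.lookup j ((l.filter (fun jv => PySem.Int.mod jv.2 pvP != 0)).map
        (fun jv => (jv.1, PySem.Int.mod jv.2 pvP))) =
      match List.lookup j l with
      | some val => if PySem.Int.mod val pvP ≠ 0 then some (PySem.Int.mod val pvP) else none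
      | none => none := by
  induction l with
  | nil => simp
  | cons p t ih =>
    obtain ⟨k, val⟩ := p
    simp only [List.map_cons, List.nodup_cons] at hl
    by_cases h : j = k
    · subst h
      have ht : List.lookup j t = none := (pv_lookup_eq_none_iff t j).mpr (by simpa using hl.1)
      rw [pv_lookup_cons_self]
      by_cases hz : PySem.Int.mod val pvP ≠ 0
      · rw [List.filter_cons_of_pos (by simpa using hz), List.map_cons, pv_lookup_cons_self]
        simp [hz]
      · rw [List.filter_cons_of_neg (by simpa using hz), ih hl.2, ht]
        simp [hz]
    · have step : List.lookup j ((((k, val) :: t).filter (fun jv => PySem.Int.mod jv.2 pvP != 0)).map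
          (fun jv => (jv.1, PySem.Int.mod jv.2 pvP))) =
          List.lookup j ((t.filter (fun jv => PySem.Int.mod jv.2 pvP != 0)).map
          (fun jv => (jv.1, PySem.Int.mod jv.2 pvP))) := by
        by_cases hz : PySem.Int.mod val pvP ≠ 0
        · rw [List.filter_cons_of_pos (p := fun jv : Int × Int => PySem.Int.mod jv.2 pvP != 0)
              (by simpa using hz), List.map_cons, pv_lookup_cons_ne _ _ h]
        · rw [List.filter_cons_of_neg (p := fun jv : Int × Int => PySem.Int.mod jv.2 pvP != 0)
              (by simpa using hz)]
      rw [step, pv_lookup_cons_ne _ _ h, ih hl.2]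

lemma pv_build_rel (vec : List (Int × Int)) : pvVRel (pvBuildA vec) (pvBuildB vec) := by
  have hnd : ((PySem.Dict.ofList vec).items.map Prod.fst).Nodup := by
    simpa [PySem.Dict.keys] using PySem.Dict.nodup_keys_ofList vec
  have hpairs_nd : ((((PySem.Dict.ofList vec).items.filter
      (fun jv => PySem.Int.mod jv.2 pvP != 0)).map
      (fun jv => (jv.1, PySem.Int.mod jv.2 pvP))).map Prod.fst).Nodup := by
    rw [List.map_map]
    have : ((PySem.Dict.ofList vec).items.filter
        (fun jv => PySem.Int.mod jv.2 pvP != 0)).map Prod.fst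
        |>.Sublist ((PySem.Dict.ofList vec).items.map Prod.fst) :=
      List.Sublist.map _ List.filter_sublist
    exact (this.nodup hnd)
  have hperm := PySem.List.sorted_perm (((PySem.Dict.ofList vec).items.filter
      (fun jv => PySem.Int.mod jv.2 pvP != 0)).map
      (fun jv => (jv.1, PySem.Int.mod jv.2 pvP))) (fun kv : Int × Int => kv.1) true
  have hBnd : ((pvBuildB vec).map Prod.fst).Nodup := by
    unfold pvBuildB
    exact ((hperm.map Prod.fst).nodup_iff).mpr hpairs_nd
  refine ⟨pv_buildA_nodup _ _ PySem.Dict.nodup_keys_empty, ?_, ?_⟩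
  · have hle : (pvBuildB vec).Pairwise (fun a b : Int × Int => b.1 ≤ a.1) :=
      PySem.List.sorted_pairwise_rev _ _
    have hne : (pvBuildB vec).Pairwise (fun a b : Int × Int => a.1 ≠ b.1) :=
      List.pairwise_map.mp hBnd
    exact (hle.and hne).imp (fun hab => lt_of_le_of_ne hab.1 (Ne.symm hab.2))
  · intro j
    unfold pvBuildA pvBuildB
    rw [pv_buildA_get? _ hnd PySem.Dict.empty j,
        pv_lookup_eq_of_perm _ _ hperm (by unfold pvBuildB at hBnd; exact hBnd) j,
        pv_buildB_lookup _ hnd j]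
    cases List.lookup j (PySem.Dict.ofList vec).items with
    | none => simp
    | some val =>
      by_cases hz : PySem.Int.mod val pvP ≠ 0 <;> simp [hz]

lemma pv_keys_nil (dv : PySem.Dict Int Int) (h : pvVRel dv []) :
    PySem.List.max? dv.keys (fun j => j) = none := by
  obtain ⟨hnd, -, hlk⟩ := h
  rw [PySem.List.max?_eq_none_iff]
  rw [List.eq_nil_iff_forall_not_mem]
  intro k hk
  exact (PySem.Dict.get?_eq_none_iff_not_mem_keys dv k).mp (by simpa using hlk k) hk

lemma pv_max_keys (dv : PySem.Dict Int Int) (pivot lead : Int) (t : List (Int × Int))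
    (h : pvVRel dv ((pivot, lead) :: t)) :
    PySem.List.max? dv.keys (fun j => j) = some pivot ∧ dv.getD pivot 0 = lead := by
  obtain ⟨hnd, hs, hlk⟩ := h
  have hp : dv.get? pivot = some lead := by rw [hlk pivot, pv_lookup_cons_self]
  have hpm : pivot ∈ dv.keys := by
    by_contra hc
    rw [(PySem.Dict.get?_eq_none_iff_not_mem_keys dv pivot).mpr hc] at hp
    cases hp
  have hbound : ∀ y ∈ dv.keys, y ≤ pivot := by
    intro y hy
    have hns : dv.get? y ≠ none := by
      intro hcon
      exact (PySem.Dict.get?_eq_none_iff_not_mem_keys dv y).mp hcon hy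
    rw [hlk y] at hns
    have hm : y ∈ ((pivot, lead) :: t).map Prod.fst := by
      by_contra hc
      exact hns ((pv_lookup_eq_none_iff _ _).mpr hc)
    rcases List.mem_cons.mp hm with h' | h'
    · omega
    · rcases List.mem_map.mp h' with ⟨b, hb, hq⟩
      rcases hs with - | ⟨hsh, -⟩
      have := hsh b hb
      simp only at *; omega
  cases hmax : PySem.List.max? dv.keys (fun j => j) with
  | none =>
    rw [PySem.List.max?_eq_none_iff] at hmax
    rw [hmax] at hpm
    cases hpm
  | some m =>
    have hm1 := PySem.List.max?_mem hmax
    have hm2 := PySem.List.max?_isMax hmax pivot hpm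
    have hm3 := hbound m hm1
    have : m = pivot := by omega
    subst this
    refine ⟨rfl, ?_⟩
    rw [PySem.Dict.getD_eq_get?_getD, hp]
    rfl

lemma pv_totA_insert (bA : PySem.Dict Int (PySem.Dict Int Int)) (pivot : Int)
    (r : PySem.Dict Int Int) (h : bA.get? pivot = none) :
    pvTotA (bA.insert pivot r) = pvTotA bA + r.items.length := by
  have hc : bA.contains pivot = false := by
    rw [PySem.Dict.contains_eq_isSome_get?, h]
    rfl
  unfold pvTotA
  rw [PySem.Dict.items_insert_of_not_contains _ _ hc, List.foldl_append]
  rfl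

lemma pv_totB_insert (bB : PySem.Dict Int (List (Int × Int))) (pivot : Int)
    (r : List (Int × Int)) (h : bB.get? pivot = none) :
    pvTotB (bB.insert pivot r) = pvTotB bB + r.length := by
  have hc : bB.contains pivot = false := by
    rw [PySem.Dict.contains_eq_isSome_get?, h]
    rfl
  unfold pvTotB
  rw [PySem.Dict.items_insert_of_not_contains _ _ hc, List.foldl_append]
  rfl

lemma pv_brel_empty : pvBRel PySem.Dict.empty PySem.Dict.empty := by
  refine ⟨PySem.Dict.nodup_keys_empty, PySem.Dict.nodup_keys_empty, rfl, ?_⟩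
  intro k
  rw [PySem.Dict.get?_empty, PySem.Dict.get?_empty]
  exact trivial

lemma pv_loop_bisim (fuel : Nat) : ∀ (bA : PySem.Dict Int (PySem.Dict Int Int))
    (bB : PySem.Dict Int (List (Int × Int))) (rank : Int) (dv : PySem.Dict Int Int)
    (lv : List (Int × Int)), pvBRel bA bB → pvVRel dv lv →
    pvBRel (pvLoopA fuel bA rank dv).1 (pvLoopB fuel bB rank lv).1 ∧
      (pvLoopA fuel bA rank dv).2 = (pvLoopB fuel bB rank lv).2 := by
  induction fuel with
  | zero => intro bA bB rank dv lv hB hV; exact ⟨hB, rfl⟩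
  | succ fuel ih =>
    intro bA bB rank dv lv hB hV
    rcases lv with _ | ⟨⟨pivot, lead⟩, t⟩
    · have hmax := pv_keys_nil dv hV
      simp only [pvLoopA, pvLoopB, hmax]
      exact ⟨hB, trivial⟩
    · obtain ⟨hmax, hlead⟩ := pv_max_keys dv pivot lead t hV
      have hrel := hB.2.2.2 pivot
      simp only [pvLoopA, pvLoopB, hmax]
      cases hA : bA.get? pivot with
      | none =>
        cases hBk : bB.get? pivot with
        | none =>
          simp only [hA, hBk]
          rw [hlead]
          have hVN := pv_norm_rel (pvModInv lead) dv ((pivot, lead) :: t)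
            (by rw [← hlead] at hV ⊢; exact hV)
          refine ⟨⟨?_, ?_, ?_, ?_⟩, trivial⟩
          · exact PySem.Dict.nodup_keys_insert _ _ _ hB.1
          · exact PySem.Dict.nodup_keys_insert _ _ _ hB.2.1
          · rw [pv_totA_insert _ _ _ hA, pv_totB_insert _ _ _ hBk, hB.2.2.1,
                pv_vrel_length _ _ hVN]
          · intro k
            by_cases hk : k = pivot
            · subst hk
              rw [PySem.Dict.get?_insert_self, PySem.Dict.get?_insert_self]
              exact hVN
            · rw [PySem.Dict.get?_insert_of_ne _ _ hk, PySem.Dict.get?_insert_of_ne _ _ hk]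
              exact hB.2.2.2 k
        | some lrow =>
          rw [hA, hBk] at hrel
          simp only [pvRowRel] at hrel
      | some drow =>
        cases hBk : bB.get? pivot with
        | none =>
          rw [hA, hBk] at hrel
          simp only [pvRowRel] at hrel
        | some lrow =>
          rw [hA, hBk] at hrel
          simp only [pvRowRel] at hrel
          simp only [hA, hBk]
          rw [hlead]
          exact ih bA bB rank _ _ hB (pv_sub_rel lead dv ((pivot, lead) :: t) drow lrow hV hrel)

lemma pv_outer (vectors : List (List (Int × Int))) :
    ∀ (bA : PySem.Dict Int (PySem.Dict Int Int)) (bB : PySem.Dict Int (List (Int × Int)))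
      (rank : Int), pvBRel bA bB →
      (vectors.foldl pvFeedA (bA, rank)).2 = (vectors.foldl pvFeedB (bB, rank)).2 := by
  induction vectors with
  | nil => intro bA bB rank hB; rfl
  | cons vec rest ih =>
    intro bA bB rank hB
    simp only [List.foldl_cons]
    have hV := pv_build_rel vec
    have hlen : (pvBuildA vec).items.length = (pvBuildB vec).length := pv_vrel_length _ _ hV
    have hfuel : (pvBuildA vec).items.length + pvTotA bA + 1
        = (pvBuildB vec).length + pvTotB bB + 1 := by rw [hlen, hB.2.2.1]
    have hbis := pv_loop_bisim ((pvBuildA vec).items.length + pvTotA bA + 1)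
      bA bB rank (pvBuildA vec) (pvBuildB vec) hB hV
    rw [hfuel] at hbis
    show (List.foldl pvFeedA (pvFeedA (bA, rank) vec) rest).2
        = (List.foldl pvFeedB (pvFeedB (bB, rank) vec) rest).2
    simp only [pvFeedA, pvFeedB]
    rw [hfuel]
    set pA := pvLoopB ((pvBuildB vec).length + pvTotB bB + 1) bB rank (pvBuildB vec) with hpB
    show (List.foldl pvFeedA
        ((pvLoopA ((pvBuildB vec).length + pvTotB bB + 1) bA rank (pvBuildA vec)).1,
         (pvLoopA ((pvBuildB vec).length + pvTotB bB + 1) bA rank (pvBuildA vec)).2) rest).2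
      = (List.foldl pvFeedB (pA.1, pA.2) rest).2
    rw [hbis.2, hpB]
    exact ih _ _ _ hbis.1

-- ===== VERDICT (by name: the statement is the Claim_ definition above) =====
theorem rank_stream_spec : Claim_equal_rank_stream := by
  intro vectors ncols _
  unfold Spec_rank_stream rank_stream rank_stream_alt
  exact pv_outer vectors PySem.Dict.empty PySem.Dict.empty 0 pv_brel_empty
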